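-- pv_equiv track=rewrite | github.com/2018-BGMP/demultiplexing-tcloaken | Demultiplexing.py | buildSet
-- ===== SOURCE A (Python) =====
-- def permutides(n):
--
-- 	""" permutes Nucleotides and returns a list of the columns
-- 	n = 1   n=2   n=3
-- 	A		A A  A A A   ...
-- 	C		A C  A A C
-- 	T		A T  A A T
-- 	G		A G  A A G
-- 			C A  A C A
-- 			C C  A C C
-- 			C T  A C T
-- 			C G  A C G
-- 			T A  A T .
-- 			T C  A T .
-- 			T T  A T .
-- 			T G  A T
-- 			G A  A G
-- 			G C  A G
-- 			G T  A G
-- 			G G  A G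
-- 	"""
-- 	nucl = ["A","C","T","G"]
-- 	bigSet = []
-- 	for i in range(n,0,-1):
-- 		bigSet.append("".join([x*4**(i-1) for x in nucl]*(4**(n-i))))
-- 	return bigSet
--
-- def buildSet(barcode,NrecMin):
-- 	"""given a barcode with at least one 'N' then we build a
-- 	set	with different nucleotides to replace the 'Ns'"""
-- 	#set of possibilities that the string could be
-- 	#if it were actually nucleotides instead of "N"s
-- 	setN = set()
-- 	#get positions in barcode where "N"s are
-- 	pos = [i for i, ltr in enumerate(barcode) if ltr == "N"]
-- 	n = len(pos) #the number of "N"s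
-- 	if n >= NrecMin:
-- 		#too many N's, abort
-- 		return setN #return an empty set
-- 	bar = list(barcode) #make it mutable
-- 	listN = permutides(n) #get permutation list
-- 	#loop through number of permutations (4 ^ # of N's in barcode)
-- 	for i in range(4**n):
-- 		#loop through number of positions of "N"
-- 		for j,x in enumerate(pos):
-- 			#Change each "N" to a possibility of nucleotide
-- 			bar[x] = listN[j][i]
-- 		#add it to the set of possibilities
-- 		setN.add("".join(bar))
--
-- 	return setN #return set of possibilities
-- ===== SOURCE B (Python) =====
-- def buildSet(barcode, NrecMin):
--     """given a barcode with at least one 'N' then we build a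
--     set with different nucleotides to replace the 'Ns'"""
--     # positions of the "N"s
--     pos = [i for i, ltr in enumerate(barcode) if ltr == "N"]
--     if len(pos) >= NrecMin:
--         # too many N's, abort
--         return set()
--     # progressive expansion: replace one N position per round
--     results = [barcode]
--     for p in pos:
--         results = [s[:p] + c + s[p + 1:] for s in results for c in "ACTG"]
--     return set(results)
-- ===== Notes on version B (the rewrite author's own statement) =====
-- stated objective: simpler
-- what changed: Instead of precomputing n column strings of length 4^n (permutides) and decoding each of the 4^n indices through them into a mutated char buffer, B grows the result by replacing one N position per round, expanding each current string into its four one-letter variants.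
import Mathlib
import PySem

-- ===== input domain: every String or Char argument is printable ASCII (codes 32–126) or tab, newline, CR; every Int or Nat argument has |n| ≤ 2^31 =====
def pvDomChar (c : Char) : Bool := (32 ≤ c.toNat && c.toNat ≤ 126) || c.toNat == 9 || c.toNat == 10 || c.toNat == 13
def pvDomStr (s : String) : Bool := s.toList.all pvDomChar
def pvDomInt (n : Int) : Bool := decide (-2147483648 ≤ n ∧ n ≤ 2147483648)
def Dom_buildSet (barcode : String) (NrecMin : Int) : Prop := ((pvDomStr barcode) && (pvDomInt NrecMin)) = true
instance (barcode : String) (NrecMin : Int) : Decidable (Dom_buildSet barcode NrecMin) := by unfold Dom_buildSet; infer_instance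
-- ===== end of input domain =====

-- B replaces A's permutides column-strings + index decoding by progressive expansion of the
-- N positions (one position per round); same returned set, simpler code, similar cost.

-- ===== PORT A =====
-- Strings are handled at the List Char level (PySem.Chars convention): a 1-character Python
-- string is a Char, "".join of 1-character strings is String.ofList.

-- nucl = ["A","C","T","G"]  (list of 1-character strings = list of singleton char lists)
def pvNucl : List (List Char) := [['A'], ['C'], ['T'], ['G']]

-- permutides(n): for i in range(n,0,-1): append "".join([x*4**(i-1) for x in nucl]*(4**(n-i)))
def permutides (n : Nat) : List (List Char) :=
  (PySem.List.pyRange (n : Int) 0 (-1)).foldl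
    (fun acc i =>
      acc ++ [(PySem.List.pyRepeat
                 (pvNucl.map (fun x => PySem.List.pyRepeat x ((4:Int) ^ (i - 1).toNat)))
                 ((4:Int) ^ ((n : Int) - i).toNat)).flatten])
    []

def buildSet (barcode : String) (NrecMin : Int) : List String :=
  -- pos = [i for i, ltr in enumerate(barcode) if ltr == "N"]
  let pos : List Int :=
    ((PySem.List.enumerate barcode.toList 0).filter (fun p => p.2 == 'N')).map (·.1)
  let n : Nat := pos.length
  if NrecMin ≤ (n : Int) then
    PySem.Set.empty
  else
    let bar : List Char := barcode.toList
    let listN := permutides n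
    -- for i in range(4**n): for j,x in enumerate(pos): bar[x] = listN[j][i]; setN.add("".join(bar))
    -- (all indices are provably in range, so the total forms pySetD/pyGetD are exact here)
    let res := (PySem.List.pyRange 0 ((4:Int) ^ n) 1).foldl
      (fun (st : List Char × PySem.Set String) i =>
        let bar' := (PySem.List.enumerate pos 0).foldl
          (fun b jx => PySem.List.pySetD b jx.2
            (PySem.List.pyGetD (PySem.List.pyGetD listN jx.1 []) i ' '))
          st.1
        (bar', PySem.Set.add st.2 (String.ofList bar')))
      (bar, PySem.Set.empty)
    res.2

-- ===== PORT B =====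
def buildSet_alt (barcode : String) (NrecMin : Int) : List String :=
  -- pos = [i for i, ltr in enumerate(barcode) if ltr == "N"]
  let pos : List Int :=
    ((PySem.List.enumerate barcode.toList 0).filter (fun p => p.2 == 'N')).map (·.1)
  if NrecMin ≤ (pos.length : Int) then
    PySem.Set.empty
  else
    -- results = [barcode]; for p in pos: results = [s[:p]+c+s[p+1:] for s in results for c in "ACTG"]
    let results := pos.foldl
      (fun (res : List (List Char)) p =>
        res.flatMap (fun s => ("ACTG".toList).map (fun c =>
          PySem.List.slice s none (some p) ++ [c] ++ PySem.List.slice s (some (p + 1)) none)))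
      [barcode.toList]
    PySem.Set.ofList (results.map String.ofList)

-- ===== PRECONDITION & SPEC =====
def Spec_buildSet (barcode : String) (NrecMin : Int) (out : List String) : Prop := out = buildSet_alt barcode NrecMin
instance (barcode : String) (NrecMin : Int) (out : List String) : Decidable (Spec_buildSet barcode NrecMin out) := by unfold Spec_buildSet; infer_instance

-- ===== CLAIM (what is proved, stated in full; the proofs are below) =====
def Claim_equal_buildSet : Prop := ∀ (barcode : String) (NrecMin : Int), Dom_buildSet barcode NrecMin → Spec_buildSet barcode NrecMin (buildSet barcode NrecMin)

-- ===== LEMMAS AND PROOFS =====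

-- the four nucleotide characters
def nuc : List Char := ['A', 'C', 'T', 'G']

-- canonical expansion: all assignments of nucleotides to the positions, first position most significant
def gen (cs : List Char) : List Nat → List (List Char)
  | [] => [cs]
  | p :: ps => nuc.flatMap (fun c => gen (cs.set p c) ps)

-- digit decoding: position j of ps receives nucleotide (i / 4^(remaining)) % 4
def assign (cs : List Char) : List Nat → Nat → List Char
  | [], _ => cs
  | p :: ps, i => assign (cs.set p (nuc.getD (i / 4 ^ ps.length % 4) 'A')) ps (i % 4 ^ ps.length)

-- A's inner loop, with the original i kept at every step (digit read by division only)
def goA : List Char → List Int → Nat → List Char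
  | b, [], _ => b
  | b, p :: ps, i => goA (PySem.List.pySetD b p (nuc.getD (i / 4 ^ ps.length % 4) 'A')) ps i

theorem length_gen (ps : List Nat) (cs : List Char) : (gen cs ps).length = 4 ^ ps.length := by
  induction ps generalizing cs with
  | nil => simp [gen]
  | cons p ps ih =>
    simp [gen, ih, nuc, pow_succ]
    ring

theorem getElem_flatMap_uniform {α β : Type} (l : List α) (f : α → List β) (L : Nat)
    (hL : ∀ x ∈ l, (f x).length = L) (i : Nat) (h : i < l.length * L) (d : β) (da : α) :
    (l.flatMap f).getD i d = (f (l.getD (i / L) da)).getD (i % L) d := by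
  induction l generalizing i with
  | nil => simp at h
  | cons x l ih =>
    have hL0 : 0 < L := by
      rcases Nat.eq_zero_or_pos L with h0 | h0
      · simp [h0] at h
      · exact h0
    have hx : (f x).length = L := hL x (by simp)
    by_cases hiL : i < L
    · rw [List.flatMap_cons, List.getD_append _ _ _ _ (by omega),
        Nat.div_eq_of_lt hiL, Nat.mod_eq_of_lt hiL]
      simp
    · have h' : i < l.length * L + L := by
        have := h; simp [Nat.succ_mul] at this; omega
      have hrec := ih (fun y hy => hL y (by simp [hy])) (i - L) (by omega)
      rw [List.flatMap_cons, List.getD_append_right _ _ _ _ (by rw [hx]; omega)]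
      rw [hx, hrec]
      have h1 : i = (i - L) + L := by omega
      have hdiv : (i - L) / L + 1 = i / L := by
        conv_rhs => rw [h1]
        rw [Nat.add_div_right _ hL0]
      have hmod : (i - L) % L = i % L := by
        conv_rhs => rw [h1]
        rw [Nat.add_mod_right]
      rw [hmod, ← hdiv]
      simp

theorem getD_gen (ps : List Nat) (cs : List Char) (i : Nat) (h : i < 4 ^ ps.length) (d : List Char) :
    (gen cs ps).getD i d = assign cs ps i := by
  induction ps generalizing cs i with
  | nil =>
    have : i = 0 := by simpa using h
    subst this
    simp [gen, assign]
  | cons p ps ih =>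
    have hL0 : 0 < 4 ^ ps.length := Nat.pow_pos (by omega)
    have hlen : ∀ x ∈ nuc, (gen (cs.set p x) ps).length = 4 ^ ps.length :=
      fun x _ => length_gen ps _
    have hi4 : i / 4 ^ ps.length < 4 := by
      rw [Nat.div_lt_iff_lt_mul hL0]
      have : (4:Nat) ^ (p :: ps).length = 4 * 4 ^ ps.length := by
        simp [pow_succ]; ring
      omega
    rw [gen, getElem_flatMap_uniform nuc _ (4 ^ ps.length) hlen i
          (by have : (4:Nat) ^ (p :: ps).length = 4 * 4 ^ ps.length := by simp [pow_succ]; ring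
              simp [nuc]; omega) d 'A',
        ih _ _ (Nat.mod_lt _ hL0)]
    rw [assign]
    have : nuc.getD (i / 4 ^ ps.length) 'A' = nuc.getD (i / 4 ^ ps.length % 4) 'A' := by
      rw [Nat.mod_eq_of_lt hi4]
    rw [this]

theorem pyRepeat_eq {α : Type} (xs : List α) (m : Int) :
    PySem.List.pyRepeat xs m = (List.replicate m.toNat xs).flatten := by
  simp [PySem.List.pyRepeat]

theorem getD_flatten_replicate {α : Type} (m : Nat) (pat : List α) (i : Nat)
    (h : i < m * pat.length) (d : α) :
    ((List.replicate m pat).flatten).getD i d = pat.getD (i % pat.length) d := by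
  induction m generalizing i with
  | zero => simp at h
  | succ m ih =>
    have hL0 : 0 < pat.length := by
      rcases Nat.eq_zero_or_pos pat.length with h0 | h0
      · simp [h0] at h
      · exact h0
    rw [List.replicate_succ, List.flatten_cons]
    by_cases hiL : i < pat.length
    · rw [List.getD_append _ _ _ _ hiL, Nat.mod_eq_of_lt hiL]
    · have h' : i - pat.length < m * pat.length := by
        have := h; rw [Nat.succ_mul] at this; omega
      rw [List.getD_append_right _ _ _ _ (by omega), ih _ h']
      have h1 : i = (i - pat.length) + pat.length := by omega
      conv_rhs => rw [h1, Nat.add_mod_right]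

theorem toNat_four_pow (t : Nat) : ((4:Int) ^ t).toNat = 4 ^ t := by
  rw [show ((4:Int) ^ t) = ((4 ^ t : Nat) : Int) by push_cast; ring]
  exact Int.toNat_natCast _

theorem flatten_flatten_replicate {α : Type} (m : Nat) (Q : List (List α)) :
    ((List.replicate m Q).flatten).flatten = (List.replicate m Q.flatten).flatten := by
  induction m with
  | zero => rfl
  | succ m ih => simp only [List.replicate_succ, List.flatten_cons, List.flatten_append, ih]

theorem patternChar (k t : Nat) (ht : t < 4 ^ (k + 1)) (d : Char) :
    ([List.replicate (4 ^ k) 'A', List.replicate (4 ^ k) 'C',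
      List.replicate (4 ^ k) 'T', List.replicate (4 ^ k) 'G'].flatten).getD t d
    = nuc.getD (t / 4 ^ k) 'A' := by
  have hq : 0 < 4 ^ k := Nat.pow_pos (by omega)
  have ht4 : t < 4 * 4 ^ k := by
    have : (4:Nat) ^ (k + 1) = 4 * 4 ^ k := by rw [pow_succ]; ring
    omega
  simp only [List.flatten_cons, List.flatten_nil, List.append_nil]
  by_cases h0 : t < 4 ^ k
  · rw [List.getD_append _ _ _ _ (by simp; omega), List.getD_replicate _ h0,
        Nat.div_eq_of_lt h0]
    rfl
  · rw [List.getD_append_right _ _ _ _ (by simp; omega)]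
    simp only [List.length_replicate]
    by_cases h1 : t < 2 * 4 ^ k
    · rw [List.getD_append _ _ _ _ (by simp; omega), List.getD_replicate _ (by omega),
          Nat.div_eq_of_lt_le (k := 1) (by omega) (by omega)]
      rfl
    · rw [List.getD_append_right _ _ _ _ (by simp; omega)]
      simp only [List.length_replicate]
      by_cases h2 : t < 3 * 4 ^ k
      · rw [List.getD_append _ _ _ _ (by simp; omega), List.getD_replicate _ (by omega),
            Nat.div_eq_of_lt_le (k := 2) (by omega) (by omega)]
        rfl
      · rw [List.getD_append_right _ _ _ _ (by simp; omega)]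
        simp only [List.length_replicate]
        rw [List.getD_replicate _ (by omega),
            Nat.div_eq_of_lt_le (k := 3) (by omega) (by omega)]
        rfl

-- the character formula for permutides:  listN[j][i] = nuc[(i / 4^(n-1-j)) % 4]
theorem permChar (n j i : Nat) (hj : j < n) (hi : i < 4 ^ n) :
    ((permutides n).getD j []).getD i ' ' = nuc.getD (i / 4 ^ (n - 1 - j) % 4) 'A' := by
  set k := n - 1 - j with hk
  have hq : 0 < 4 ^ k := Nat.pow_pos (by omega)
  have hjk : j + (k + 1) = n := by omega
  -- permutides n as a map over the countdown range
  rw [permutides, PySem.List.foldl_append_singleton_eq_map, List.nil_append,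
      PySem.List.pyRange_neg_one]
  have hnn : ((n:Int) - 0).toNat = n := by omega
  rw [hnn, List.map_map, PySem.List.getD_map_range _ _ _ _ hj]
  -- the j-th column string
  have e1 : (((n:Int) - (j:Int)) - 1).toNat = k := by omega
  have e2 : ((n:Int) - ((n:Int) - (j:Int))).toNat = j := by omega
  simp only [Function.comp, e1, e2]
  rw [pyRepeat_eq, toNat_four_pow, flatten_flatten_replicate]
  have epat : (pvNucl.map (fun x => PySem.List.pyRepeat x ((4:Int) ^ k))).flatten
      = [List.replicate (4 ^ k) 'A', List.replicate (4 ^ k) 'C',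
         List.replicate (4 ^ k) 'T', List.replicate (4 ^ k) 'G'].flatten := by
    simp only [pvNucl, List.map_cons, List.map_nil, PySem.List.pyRepeat_singleton,
      toNat_four_pow]
  rw [epat]
  have hlen : ([List.replicate (4 ^ k) 'A', List.replicate (4 ^ k) 'C',
      List.replicate (4 ^ k) 'T', List.replicate (4 ^ k) 'G'].flatten).length = 4 ^ (k + 1) := by
    simp [pow_succ]
    ring
  rw [getD_flatten_replicate _ _ _ (by
        rw [hlen, ← pow_add, hjk]
        exact hi)]
  rw [hlen, patternChar k _ (Nat.mod_lt _ (Nat.pow_pos (by omega))) ' ']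
  congr 1
  rw [pow_succ, Nat.mod_mul_right_div_self]

-- facts about pos
theorem pos_mem (cs : List Char) (p : Int)
    (hp : p ∈ ((PySem.List.enumerate cs 0).filter (fun q => q.2 == 'N')).map (·.1)) :
    0 ≤ p ∧ p.toNat < cs.length := by
  simp only [List.mem_map, List.mem_filter] at hp
  obtain ⟨⟨j, c⟩, ⟨hmem, _⟩, rfl⟩ := hp
  rw [PySem.List.mem_enumerate_iff] at hmem
  obtain ⟨k, hk, hEq⟩ := hmem
  simp at hEq
  obtain ⟨rfl, -⟩ := hEq
  simp
  omega

theorem goA_eq_assign (ps : List Int) (b : List Char) (i : Nat) (h0 : ∀ p ∈ ps, 0 ≤ p) :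
    goA b ps i = assign b (ps.map Int.toNat) (i % 4 ^ ps.length) := by
  induction ps generalizing b with
  | nil => simp [goA, assign]
  | cons p ps ih =>
    have hp0 : (0:Int) ≤ p := h0 p (by simp)
    rw [goA, ih _ (fun q hq => h0 q (by simp [hq])), List.map_cons, assign,
        PySem.List.pySetD_of_nonneg _ _ hp0]
    simp only [List.length_map, List.length_cons]
    have e1 : i % 4 ^ (ps.length + 1) / 4 ^ ps.length % 4 = i / 4 ^ ps.length % 4 := by
      rw [pow_succ, Nat.mod_mul_right_div_self]
      omega
    have e2 : i % 4 ^ (ps.length + 1) % 4 ^ ps.length = i % 4 ^ ps.length :=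
      Nat.mod_mod_of_dvd i (pow_dvd_pow 4 (by omega))
    rw [e1, e2]

-- A's inner enumerate-fold is goA, once the loop body is rewritten by permChar
theorem innerA_eq_goA (ps : List Int) (s : Nat) (b : List Char) (i N : Nat)
    (hN : N = s + ps.length) :
    (PySem.List.enumerate ps (s : Int)).foldl
      (fun b jx => PySem.List.pySetD b jx.2 (nuc.getD (i / 4 ^ (N - 1 - jx.1.toNat) % 4) 'A')) b
    = goA b ps i := by
  induction ps generalizing s b with
  | nil => simp [goA, PySem.List.enumerate_nil]
  | cons p ps ih =>
    have hN' : N = s + ps.length + 1 := by simpa using hN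
    rw [PySem.List.enumerate_cons, List.foldl_cons, goA]
    have h1 : ((s:Int)).toNat = s := by simp
    have h2 : N - 1 - s = ps.length := by omega
    rw [h1, h2]
    have h3 : ((s:Int)) + 1 = ((s+1 : Nat) : Int) := by push_cast; ring
    rw [h3, ih (s+1) _ (by omega)]

-- setting positions only changes those positions / result does not depend on off-position content
theorem innerSet_congr (P : List (Int × Int)) (v : Int → Char) (b₁ b₂ : List Char)
    (hP : ∀ x ∈ P, 0 ≤ x.2)
    (hl : b₁.length = b₂.length)
    (hq : ∀ q : Nat, q ∉ P.map (fun x => x.2.toNat) → b₁[q]? = b₂[q]?) :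
    P.foldl (fun b jx => PySem.List.pySetD b jx.2 (v jx.1)) b₁
    = P.foldl (fun b jx => PySem.List.pySetD b jx.2 (v jx.1)) b₂ := by
  induction P generalizing b₁ b₂ with
  | nil =>
    simp only [List.foldl_nil]
    apply List.ext_getElem?
    intro q
    exact hq q (by simp)
  | cons x P ih =>
    simp only [List.foldl_cons]
    rw [PySem.List.pySetD_of_nonneg _ _ (hP x (by simp)),
        PySem.List.pySetD_of_nonneg _ _ (hP x (by simp))]
    apply ih _ _ (fun y hy => hP y (by simp [hy])) (by simp [hl])
    intro q hqmem
    by_cases hqx : q = x.2.toNat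
    · subst hqx
      rw [List.getElem?_set_self', List.getElem?_set_self']
      by_cases hlt : x.2.toNat < b₂.length
      · rw [List.getElem?_eq_getElem (by omega), List.getElem?_eq_getElem hlt]
        rfl
      · rw [List.getElem?_eq_none (by omega), List.getElem?_eq_none (by omega)]
    · rw [List.getElem?_set_ne (by omega), List.getElem?_set_ne (by omega)]
      exact hq q (by simp at hqmem ⊢; tauto)

theorem innerSet_off (P : List (Int × Int)) (v : Int → Char) (b : List Char)
    (hP : ∀ x ∈ P, 0 ≤ x.2) :
    (P.foldl (fun b jx => PySem.List.pySetD b jx.2 (v jx.1)) b).length = b.length ∧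
    ∀ q : Nat, q ∉ P.map (fun x => x.2.toNat) →
      (P.foldl (fun b jx => PySem.List.pySetD b jx.2 (v jx.1)) b)[q]? = b[q]? := by
  induction P generalizing b with
  | nil => simp
  | cons x P ih =>
    simp only [List.foldl_cons]
    rw [PySem.List.pySetD_of_nonneg _ _ (hP x (by simp))]
    obtain ⟨ihl, ihq⟩ := ih (b.set x.2.toNat (v x.1)) (fun y hy => hP y (by simp [hy]))
    constructor
    · rw [ihl, List.length_set]
    · intro q hqmem
      have hqx : q ≠ x.2.toNat := by simp at hqmem; tauto
      rw [ihq q (by simp at hqmem ⊢; tauto), List.getElem?_set_ne (by omega)]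


-- the value written by A's inner loop at step i
def innerVal (pos : List Int) (listN : List (List Char)) (i : Int) (b : List Char) : List Char :=
  (PySem.List.enumerate pos 0).foldl
    (fun b jx => PySem.List.pySetD b jx.2
      (PySem.List.pyGetD (PySem.List.pyGetD listN jx.1 []) i ' ')) b

-- A's main loop: the threaded buffer can be replaced by the original characters
theorem loopA (pos : List Int) (listN : List (List Char)) (cs : List Char)
    (hp : ∀ p ∈ pos, 0 ≤ p ∧ p.toNat < cs.length) :
    ∀ (l : List Int) (b : List Char) (acc : PySem.Set String),
    b.length = cs.length →
    (∀ q : Nat, q ∉ pos.map Int.toNat → b[q]? = cs[q]?) →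
    (l.foldl (fun (st : List Char × PySem.Set String) i =>
        (innerVal pos listN i st.1,
         PySem.Set.add st.2 (String.ofList (innerVal pos listN i st.1)))) (b, acc)).2
    = l.foldl (fun acc i => PySem.Set.add acc (String.ofList (innerVal pos listN i cs))) acc := by
  have hP : ∀ x ∈ PySem.List.enumerate pos 0, (0:Int) ≤ x.2 := by
    intro x hx
    have := List.mem_map_of_mem (f := fun x => x.2) hx
    rw [PySem.List.map_snd_enumerate] at this
    exact (hp _ this).1
  have hmapPos : (PySem.List.enumerate pos 0).map (fun x => x.2.toNat) = pos.map Int.toNat := by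
    rw [show (fun (x : Int × Int) => x.2.toNat) = (Int.toNat ∘ fun x => x.2) from rfl,
        ← List.map_map, PySem.List.map_snd_enumerate]
  intro l
  induction l with
  | nil => intro b acc hb hq; rfl
  | cons i l ih =>
    intro b acc hb hq
    simp only [List.foldl_cons]
    have hbc : innerVal pos listN i b = innerVal pos listN i cs := by
      unfold innerVal
      apply innerSet_congr _
        (fun j => PySem.List.pyGetD (PySem.List.pyGetD listN j []) i ' ') _ _ hP hb
      intro q hqm
      exact hq q (by rwa [hmapPos] at hqm)
    rw [hbc]
    obtain ⟨hl', hq'⟩ := innerSet_off (PySem.List.enumerate pos 0)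
      (fun j => PySem.List.pyGetD (PySem.List.pyGetD listN j []) i ' ') cs hP
    exact ih _ _ (by unfold innerVal; exact hl')
      (by intro q hqm
          unfold innerVal
          exact hq' q (by rwa [hmapPos]))

-- B's expansion fold computes gen
theorem foldB (ps : List Int) (m : Nat) (ss : List (List Char))
    (hss : ∀ s ∈ ss, s.length = m) (hp : ∀ p ∈ ps, 0 ≤ p ∧ p.toNat < m) :
    ps.foldl
      (fun (res : List (List Char)) p =>
        res.flatMap (fun s => ("ACTG".toList).map (fun c =>
          PySem.List.slice s none (some p) ++ [c] ++ PySem.List.slice s (some (p + 1)) none)))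
      ss
    = ss.flatMap (fun s => gen s (ps.map Int.toNat)) := by
  induction ps generalizing ss with
  | nil => simp [gen]
  | cons p ps ih =>
    obtain ⟨hp0, hpm⟩ := hp p (by simp)
    rw [List.foldl_cons]
    have hstep : ss.flatMap (fun s => ("ACTG".toList).map (fun c =>
        PySem.List.slice s none (some p) ++ [c] ++ PySem.List.slice s (some (p + 1)) none))
        = ss.flatMap (fun s => nuc.map (fun c => s.set p.toNat c)) := by
      apply List.flatMap_congr
      intro s hs
      have hsl : s.length = m := hss s hs
      apply List.map_congr_left
      intro c _
      rw [PySem.List.slice_to _ hp0, PySem.List.slice_from _ (by omega),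
          List.set_eq_take_cons_drop c (by omega)]
      have : (p + 1).toNat = p.toNat + 1 := by omega
      rw [this]
      simp
    rw [hstep, ih _ (by
        intro s hs
        simp only [List.mem_flatMap, List.mem_map] at hs
        obtain ⟨t, ht, c, -, rfl⟩ := hs
        rw [List.length_set]
        exact hss t ht)
      (fun q hq => hp q (by simp [hq]))]
    rw [List.flatMap_assoc]
    apply List.flatMap_congr
    intro s hs
    rw [List.map_cons, gen, List.flatMap_map]

theorem range_map_assign (ps : List Nat) (cs : List Char) :
    (List.range (4 ^ ps.length)).map (fun i => assign cs ps i) = gen cs ps := by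
  apply List.ext_getElem
  · simp [length_gen]
  · intro i h1 h2
    simp only [List.getElem_map, List.getElem_range]
    have hi : i < 4 ^ ps.length := by simpa using h1
    rw [← List.getD_eq_getElem (gen cs ps) [] h2, getD_gen ps cs i hi]

theorem innerVal_eq_assign (cs : List Char) (pos : List Int)
    (hp : ∀ p ∈ pos, 0 ≤ p ∧ p.toNat < cs.length) (k : Nat) (hk : k < 4 ^ pos.length) :
    innerVal pos (permutides pos.length) (k : Int) cs = assign cs (pos.map Int.toNat) k := by
  unfold innerVal
  rw [PySem.List.foldl_congr_mem _ _
      (fun b jx => PySem.List.pySetD b jx.2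
        (nuc.getD (k / 4 ^ (pos.length - 1 - jx.1.toNat) % 4) 'A')) _ ?hcong]
  case hcong =>
    intro acc x hx
    rw [PySem.List.mem_enumerate_iff] at hx
    obtain ⟨t, ht, rfl⟩ := hx
    simp only [zero_add]
    congr 1
    rw [PySem.List.pyGetD_natCast, PySem.List.pyGetD_natCast, Int.toNat_natCast]
    exact permChar pos.length t k ht hk
  · have h0 : (0:Int) = ((0:Nat) : Int) := rfl
    rw [h0, innerA_eq_goA pos 0 cs k pos.length (by omega),
        goA_eq_assign pos cs k (fun p hp' => (hp p hp').1), Nat.mod_eq_of_lt hk]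

-- ===== VERDICT (by name: the statement is the Claim_ definition above) =====
theorem buildSet_spec : Claim_equal_buildSet := by
  unfold Claim_equal_buildSet Spec_buildSet
  intro barcode NrecMin _
  unfold buildSet buildSet_alt
  dsimp only
  by_cases hms : NrecMin ≤ ((((PySem.List.enumerate barcode.toList 0).filter
      (fun p => p.2 == 'N')).map (·.1)).length : Int)
  · rw [if_pos hms, if_pos hms]
  · rw [if_neg hms, if_neg hms]
    set cs := barcode.toList with hcs
    set pos := ((PySem.List.enumerate cs 0).filter (fun p => p.2 == 'N')).map (·.1) with hposdef
    have hp : ∀ p ∈ pos, 0 ≤ p ∧ p.toNat < cs.length := fun p hp' => pos_mem cs p hp'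
    have hA := loopA pos (permutides pos.length) cs hp
      (PySem.List.pyRange 0 ((4:Int) ^ pos.length) 1) cs PySem.Set.empty rfl (fun q _ => rfl)
    simp only [innerVal] at hA
    rw [hA]
    have hcast : ((4:Int) ^ pos.length) = ((4 ^ pos.length : Nat) : Int) := by push_cast; ring
    rw [hcast, PySem.List.pyRange_zero_nat, List.foldl_map]
    rw [PySem.List.foldl_congr_mem _ _
        (fun acc k => PySem.Set.add acc
          (String.ofList (assign cs (pos.map Int.toNat) k))) _ ?hck]
    case hck =>
      intro acc k hk
      rw [List.mem_range] at hk
      have := innerVal_eq_assign cs pos hp k hk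
      simp only [innerVal] at this
      rw [this]
    · rw [show (PySem.Set.empty : PySem.Set String) = [] from rfl,
          ← List.foldl_map (f := fun k => String.ofList (assign cs (pos.map Int.toNat) k))
            (g := PySem.Set.add), ← PySem.Set.ofList_eq_foldl,
          foldB pos cs.length [cs] (by simp) hp, List.flatMap_singleton,
          ← range_map_assign (pos.map Int.toNat) cs, List.map_map, List.length_map]
      simp only [List.map_map, List.length_map]
      apply congrArg
      apply List.map_congr_left
      intro k _
      rfl
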